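-- pv_equiv track=rewrite | github.com/yuepaang/marathon | py/py_bot.py | get_all_nearby_pos
-- ===== SOURCE A (Python) =====
-- from itertools import product
--
-- def get_all_nearby_pos(agent_pos: dict, map_in_heart: list):
--     """
--     agent_pos: {id1: (x1, y1), id2: (x2, y2)}
--     """
--     delta = [[0, 1], [0, -1], [1, 0], [-1, 0]]
--     new_pos = list()
--     ids = list()
--     for id, ap in agent_pos.items():
--         ids.append(id)
--         tmp = list()
--         for d in delta:
--             pos_tmp = (ap[0] + d[0], ap[1] + d[1])
--             if (
--                 not (0 <= pos_tmp[0] < 24)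
--                 or not (0 <= pos_tmp[1] < 24)
--                 or map_in_heart[pos_tmp[0]][pos_tmp[1]] < 0
--             ):
--                 continue
--             tmp.append(pos_tmp)
--         new_pos.append(tmp)
--
--     comb_pos = product(*new_pos)
--
--     next_pos = list()
--     for pos in comb_pos:
--         pos_dict = dict()
--         for i in range(len(ids)):
--             pos_dict[ids[i]] = pos[i]
--         next_pos.append(pos_dict)
--
--     return next_pos
-- ===== SOURCE B (Python) =====
-- def get_all_nearby_pos(agent_pos: dict, map_in_heart: list):
--     """
--     agent_pos: {id1: (x1, y1), id2: (x2, y2)}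
--     """
--     ids = []
--     nbrs = []
--     for i, (x, y) in agent_pos.items():
--         ids.append(i)
--         nbrs.append([
--             p for p in ((x, y + 1), (x, y - 1), (x + 1, y), (x - 1, y))
--             if 0 <= p[0] < 24 and 0 <= p[1] < 24 and map_in_heart[p[0]][p[1]] >= 0
--         ])
--     total = 1
--     for lst in nbrs:
--         total *= len(lst)
--     out = []
--     for k in range(total):
--         digits = []
--         rem = k
--         for lst in reversed(nbrs):
--             rem, r = divmod(rem, len(lst))
--             digits.append(lst[r])
--         out.append(dict(zip(ids, reversed(digits))))
--     return out
-- ===== Notes on version B (the rewrite author's own statement) =====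
-- stated objective: alternative
-- what changed: Replaces itertools.product over tuples plus an index-loop remapping into dicts with mixed-radix index arithmetic: B counts k from 0 to the product of the neighbor-list lengths and decodes each k into one assignment by repeated divmod, zipping the digits with the ids.
-- outside the precondition, e.g. on get_all_nearby_pos({'a': (2, 2)}, [[0, 0, 0], [0, 0, 0], [0, 0, 0]]): A raises IndexError, B raises IndexError
import Mathlib
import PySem

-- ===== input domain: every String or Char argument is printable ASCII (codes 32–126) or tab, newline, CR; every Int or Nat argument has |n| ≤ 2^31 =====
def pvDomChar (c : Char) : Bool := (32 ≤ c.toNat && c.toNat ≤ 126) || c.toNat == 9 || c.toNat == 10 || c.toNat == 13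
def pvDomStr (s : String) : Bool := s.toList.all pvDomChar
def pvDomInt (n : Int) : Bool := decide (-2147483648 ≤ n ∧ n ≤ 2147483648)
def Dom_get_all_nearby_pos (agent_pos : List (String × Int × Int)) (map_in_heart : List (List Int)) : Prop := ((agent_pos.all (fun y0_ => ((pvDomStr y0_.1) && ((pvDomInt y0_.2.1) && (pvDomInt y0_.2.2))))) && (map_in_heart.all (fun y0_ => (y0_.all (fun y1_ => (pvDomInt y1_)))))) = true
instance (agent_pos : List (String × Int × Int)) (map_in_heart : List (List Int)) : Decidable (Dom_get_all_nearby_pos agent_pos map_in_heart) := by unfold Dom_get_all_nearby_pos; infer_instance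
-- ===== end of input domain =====

-- B replaces itertools.product + tuple-to-dict remapping with mixed-radix index arithmetic:
-- it decodes each index k < prod(lengths) into one assignment by repeated divmod (objective: alternative).

-- ===== PORT A =====
-- helper: port of itertools.product(*lists) (leftmost factor varies slowest)
def pyProduct : List (List (Int × Int)) → List (List (Int × Int))
  | [] => [[]]
  | l :: ls => l.flatMap (fun x => (pyProduct ls).map (x :: ·))

def get_all_nearby_pos (agent_pos : List (String × Int × Int)) (map_in_heart : List (List Int)) : List (List (String × Int × Int)) :=
  let delta : List (Int × Int) := [(0, 1), (0, -1), (1, 0), (-1, 0)]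
  -- the loop appending to ids / new_pos, fused into one fold over agent_pos with the pair state
  let st := agent_pos.foldl (fun (acc : List String × List (List (Int × Int))) ap =>
      let tmp := delta.foldl (fun (tmp : List (Int × Int)) d =>
          let pos_tmp := (ap.2.1 + d.1, ap.2.2 + d.2)
          if ¬(0 ≤ pos_tmp.1 ∧ pos_tmp.1 < 24) ∨ ¬(0 ≤ pos_tmp.2 ∧ pos_tmp.2 < 24) ∨
              PySem.List.pyGetD (PySem.List.pyGetD map_in_heart pos_tmp.1 []) pos_tmp.2 0 < 0
          then tmp else tmp ++ [pos_tmp]) []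
      (acc.1 ++ [ap.1], acc.2 ++ [tmp])) ([], [])
  let comb_pos := pyProduct st.2
  -- 'for pos in comb_pos: pos_dict = {}; for i in range(len(ids)): pos_dict[ids[i]] = pos[i]; next_pos.append(pos_dict)'
  let next_pos := comb_pos.foldl (fun (next_pos : List (List (String × Int × Int))) pos =>
      next_pos ++ [((PySem.List.pyRange 0 (st.1.length : Int) 1).foldl
          (fun (d : PySem.Dict String (Int × Int)) i =>
             d.insert (PySem.List.pyGetD st.1 i "") (PySem.List.pyGetD pos i (0, 0)))
          PySem.Dict.empty).items]) []
  next_pos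

-- ===== PORT B =====
def get_all_nearby_pos_alt (agent_pos : List (String × Int × Int)) (map_in_heart : List (List Int)) : List (List (String × Int × Int)) :=
  -- the loop appending to ids / nbrs, fused into one fold with the pair state
  let st := agent_pos.foldl (fun (acc : List String × List (List (Int × Int))) ap =>
      (acc.1 ++ [ap.1],
       acc.2 ++ [([(ap.2.1, ap.2.2 + 1), (ap.2.1, ap.2.2 - 1), (ap.2.1 + 1, ap.2.2), (ap.2.1 - 1, ap.2.2)] :
            List (Int × Int)).filter
          (fun p => decide (0 ≤ p.1 ∧ p.1 < 24 ∧ 0 ≤ p.2 ∧ p.2 < 24 ∧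
              0 ≤ PySem.List.pyGetD (PySem.List.pyGetD map_in_heart p.1 []) p.2 0))])) ([], [])
  -- total = product of the neighbour-list lengths
  let total := st.2.foldl (fun (a : Int) l => a * (l.length : Int)) 1
  -- for k in range(total): decode k into digits by divmod over reversed(nbrs), then dict(zip(ids, reversed(digits)))
  (PySem.List.pyRange 0 total 1).foldl (fun out k =>
      let dg := st.2.reverse.foldl (fun (s : Int × List (Int × Int)) lst =>
          (PySem.Int.floordiv s.1 (lst.length : Int),
           s.2 ++ [PySem.List.pyGetD lst (PySem.Int.mod s.1 (lst.length : Int)) (0, 0)])) (k, [])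
      out ++ [((st.1.zip dg.2.reverse).foldl
          (fun (d : PySem.Dict String (Int × Int)) kv => d.insert kv.1 kv.2) PySem.Dict.empty).items]) []

-- ===== PRECONDITION & SPEC =====
-- Pre_ excludes (a) association lists with duplicate agent ids, which do not represent any
-- Python dict (the dict collapses them, the list does not), and (b) inputs where an
-- in-bounds neighbour position is outside map_in_heart, on which A raises IndexError.
def Pre_get_all_nearby_pos (agent_pos : List (String × Int × Int)) (map_in_heart : List (List Int)) : Prop :=
  (agent_pos.map (·.1)).Nodup ∧
  ∀ ap ∈ agent_pos, ∀ d ∈ ([(0, 1), (0, -1), (1, 0), (-1, 0)] : List (Int × Int)),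
    (0 ≤ ap.2.1 + d.1 ∧ ap.2.1 + d.1 < 24 ∧ 0 ≤ ap.2.2 + d.2 ∧ ap.2.2 + d.2 < 24) →
    ((PySem.List.pyGet? map_in_heart (ap.2.1 + d.1)).bind
        (fun row => PySem.List.pyGet? row (ap.2.2 + d.2))).isSome = true
instance (agent_pos : List (String × Int × Int)) (map_in_heart : List (List Int)) : Decidable (Pre_get_all_nearby_pos agent_pos map_in_heart) := by unfold Pre_get_all_nearby_pos; infer_instance

def pvWitness_get_all_nearby_pos : (List (String × Int × Int)) × List (List Int) :=
  ([("a", 1, 1)], [[0, 0, 0], [0, 0, 0], [0, 0, 0]])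

def Spec_get_all_nearby_pos (agent_pos : List (String × Int × Int)) (map_in_heart : List (List Int)) (out : List (List (String × Int × Int))) : Prop := out = get_all_nearby_pos_alt agent_pos map_in_heart
instance (agent_pos : List (String × Int × Int)) (map_in_heart : List (List Int)) (out : List (List (String × Int × Int))) : Decidable (Spec_get_all_nearby_pos agent_pos map_in_heart out) := by unfold Spec_get_all_nearby_pos; infer_instance

-- ===== CLAIM (what is proved, stated in full; the proofs are below) =====
def Claim_equal_get_all_nearby_pos : Prop := ∀ (agent_pos : List (String × Int × Int)) (map_in_heart : List (List Int)), Dom_get_all_nearby_pos agent_pos map_in_heart → Pre_get_all_nearby_pos agent_pos map_in_heart → Spec_get_all_nearby_pos agent_pos map_in_heart (get_all_nearby_pos agent_pos map_in_heart)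

-- ===== LEMMAS AND PROOFS =====

-- the neighbour list both ports compute for one agent
def pvNbr (map_in_heart : List (List Int)) (ap : String × Int × Int) : List (Int × Int) :=
  ([(0, 1), (0, -1), (1, 0), (-1, 0)] : List (Int × Int)).filterMap (fun d =>
    let p := (ap.2.1 + d.1, ap.2.2 + d.2)
    if 0 ≤ p.1 ∧ p.1 < 24 ∧ 0 ≤ p.2 ∧ p.2 < 24 ∧
        0 ≤ PySem.List.pyGetD (PySem.List.pyGetD map_in_heart p.1 []) p.2 0
    then some p else none)

-- inserting a list of key/value pairs in order
def pvExtend (d : PySem.Dict String (Int × Int)) (ids : List String) (ps : List (Int × Int)) : PySem.Dict String (Int × Int) :=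
  (ids.zip ps).foldl (fun d kv => d.insert kv.1 kv.2) d

-- product of the list lengths (the radix sizes)
def pvP (ls : List (List (Int × Int))) : Nat := (ls.map List.length).prod

-- one divmod step of B's decoder
def pvStep (s : Int × List (Int × Int)) (lst : List (Int × Int)) : Int × List (Int × Int) :=
  (PySem.Int.floordiv s.1 (lst.length : Int),
   s.2 ++ [PySem.List.pyGetD lst (PySem.Int.mod s.1 (lst.length : Int)) (0, 0)])

-- B's inner decode loop
def pvH (ls : List (List (Int × Int))) (k : Int) : Int × List (Int × Int) :=
  ls.reverse.foldl pvStep (k, [])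

theorem pvStep_fold (map_in_heart : List (List Int)) (ap : String × Int × Int) :
    ∀ (ds : List (Int × Int)) (acc : List (Int × Int)),
    ds.foldl (fun (tmp : List (Int × Int)) d =>
        let pos_tmp := (ap.2.1 + d.1, ap.2.2 + d.2)
        if ¬(0 ≤ pos_tmp.1 ∧ pos_tmp.1 < 24) ∨ ¬(0 ≤ pos_tmp.2 ∧ pos_tmp.2 < 24) ∨
            PySem.List.pyGetD (PySem.List.pyGetD map_in_heart pos_tmp.1 []) pos_tmp.2 0 < 0
        then tmp else tmp ++ [pos_tmp]) acc
      = acc ++ ds.filterMap (fun d =>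
        let p := (ap.2.1 + d.1, ap.2.2 + d.2)
        if 0 ≤ p.1 ∧ p.1 < 24 ∧ 0 ≤ p.2 ∧ p.2 < 24 ∧
            0 ≤ PySem.List.pyGetD (PySem.List.pyGetD map_in_heart p.1 []) p.2 0
        then some p else none) := by
  intro ds
  induction ds with
  | nil => intro acc; simp
  | cons d ds ih =>
      intro acc
      simp only [List.foldl_cons, List.filterMap_cons, ih]
      by_cases hb : 0 ≤ ap.2.1 + d.1 ∧ ap.2.1 + d.1 < 24 ∧ 0 ≤ ap.2.2 + d.2 ∧ ap.2.2 + d.2 < 24 ∧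
          0 ≤ PySem.List.pyGetD (PySem.List.pyGetD map_in_heart (ap.2.1 + d.1) []) (ap.2.2 + d.2) 0
      · rw [if_pos hb, if_neg (by omega)]
        simp
      · rw [if_neg hb, if_pos (by omega)]

theorem pvNbr_eq_foldl (map_in_heart : List (List Int)) (ap : String × Int × Int) :
    (([(0, 1), (0, -1), (1, 0), (-1, 0)] : List (Int × Int)).foldl
      (fun (tmp : List (Int × Int)) d =>
        let pos_tmp := (ap.2.1 + d.1, ap.2.2 + d.2)
        if ¬(0 ≤ pos_tmp.1 ∧ pos_tmp.1 < 24) ∨ ¬(0 ≤ pos_tmp.2 ∧ pos_tmp.2 < 24) ∨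
            PySem.List.pyGetD (PySem.List.pyGetD map_in_heart pos_tmp.1 []) pos_tmp.2 0 < 0
        then tmp else tmp ++ [pos_tmp]) []) = pvNbr map_in_heart ap := by
  simpa [pvNbr] using pvStep_fold map_in_heart ap ([(0, 1), (0, -1), (1, 0), (-1, 0)]) []

-- B's candidate filter computes the same neighbour list
theorem pvNbr_eq_filter (map_in_heart : List (List Int)) (ap : String × Int × Int) :
    (([(ap.2.1, ap.2.2 + 1), (ap.2.1, ap.2.2 - 1), (ap.2.1 + 1, ap.2.2), (ap.2.1 - 1, ap.2.2)] :
        List (Int × Int)).filter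
      (fun p => decide (0 ≤ p.1 ∧ p.1 < 24 ∧ 0 ≤ p.2 ∧ p.2 < 24 ∧
          0 ≤ PySem.List.pyGetD (PySem.List.pyGetD map_in_heart p.1 []) p.2 0)))
    = pvNbr map_in_heart ap := by
  simp only [pvNbr, List.filterMap_cons, List.filterMap_nil, List.filter_cons, List.filter_nil,
    add_zero, decide_eq_true_eq, sub_eq_add_neg]
  split_ifs <;> rfl

theorem pvStateFold (agent_pos : List (String × Int × Int)) (map_in_heart : List (List Int))
    (a : List String) (b : List (List (Int × Int))) :
    agent_pos.foldl (fun (acc : List String × List (List (Int × Int))) ap =>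
        (acc.1 ++ [ap.1], acc.2 ++ [pvNbr map_in_heart ap])) (a, b)
      = (a ++ agent_pos.map (·.1), b ++ agent_pos.map (pvNbr map_in_heart)) := by
  induction agent_pos generalizing a b with
  | nil => simp
  | cons x xs ih => simp [List.foldl_cons, ih]

theorem pvNatBuild : ∀ (ids : List String) (ps : List (Int × Int)) (d : PySem.Dict String (Int × Int)),
    ps.length = ids.length →
    (List.range ids.length).foldl
        (fun (d : PySem.Dict String (Int × Int)) k => d.insert (ids.getD k "") (ps.getD k (0, 0))) d
      = pvExtend d ids ps := by
  intro ids
  induction ids with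
  | nil => intro ps d h; simp [pvExtend]
  | cons a ids ih =>
      intro ps d h
      cases ps with
      | nil => simp at h
      | cons p ps =>
          simp only [List.length_cons]
          rw [List.range_succ_eq_map]
          simp only [List.foldl_cons, List.foldl_map, List.getD_cons_zero, List.getD_cons_succ]
          rw [ih ps _ (by simpa using h)]
          simp [pvExtend]

theorem pvBuild_eq_extend (ids : List String) (ps : List (Int × Int)) (d : PySem.Dict String (Int × Int))
    (h : ps.length = ids.length) :
    (PySem.List.pyRange 0 (ids.length : Int) 1).foldl
      (fun (d : PySem.Dict String (Int × Int)) i =>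
        d.insert (PySem.List.pyGetD ids i "") (PySem.List.pyGetD ps i (0, 0))) d
    = pvExtend d ids ps := by
  rw [PySem.List.pyRange_zero_natCast, List.foldl_map]
  simp only [PySem.List.pyGetD_natCast]
  exact pvNatBuild ids ps d h

theorem pvProduct_length (ls : List (List (Int × Int))) (ps : List (Int × Int)) (h : ps ∈ pyProduct ls) :
    ps.length = ls.length := by
  induction ls generalizing ps with
  | nil => simp [pyProduct] at h; simp [h]
  | cons l ls ih =>
      simp [pyProduct] at h
      obtain ⟨x, y, hxy, qs, hq, rfl⟩ := h
      simp [ih qs hq]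

-- the running product fold equals pvP
theorem pvTotal_eq (ls : List (List (Int × Int))) :
    ∀ a : Int, ls.foldl (fun (a : Int) l => a * (l.length : Int)) a = a * (pvP ls : Int) := by
  induction ls with
  | nil => intro a; simp [pvP]
  | cons l ls ih =>
      intro a
      simp only [List.foldl_cons, ih, pvP, List.map_cons, List.prod_cons]
      push_cast
      ring

theorem pvH_cons (l : List (Int × Int)) (ls : List (List (Int × Int))) (k : Int) :
    pvH (l :: ls) k = pvStep (pvH ls k) l := by
  simp [pvH, List.reverse_cons, List.foldl_append]

-- decoding invariant: the quotient strips off a multiple of the radix product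
theorem pvH_decompose : ∀ (ls : List (List (Int × Int))) (i j : Int),
    0 ≤ i → 0 ≤ j → j < (pvP ls : Int) →
    pvH ls (i * (pvP ls : Int) + j) = (i, (pvH ls j).2) := by
  intro ls
  induction ls with
  | nil =>
      intro i j _ hj0 hj1
      have : j = 0 := by simp [pvP] at hj1; omega
      subst this
      simp [pvH, pvP]
  | cons l ls ih =>
      intro i j hi hj0 hj1
      have hPl : (pvP (l :: ls) : Int) = (l.length : Int) * (pvP ls : Int) := by
        simp [pvP]
      have hP0 : 0 < (pvP ls : Int) := by
        rcases Nat.eq_zero_or_pos (pvP ls) with h | h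
        · exfalso; rw [hPl, h] at hj1; simp only [Nat.cast_zero] at hj1; omega
        · exact_mod_cast h
      have hl0 : 0 < (l.length : Int) := by
        rcases Nat.eq_zero_or_pos l.length with h | h
        · exfalso; rw [hPl, h] at hj1; simp only [Nat.cast_zero] at hj1; omega
        · exact_mod_cast h
      -- split j into j1 * P + j2
      set j1 := j / (pvP ls : Int) with hj1def
      set j2 := j % (pvP ls : Int) with hj2def
      have hj2bounds : 0 ≤ j2 ∧ j2 < (pvP ls : Int) :=
        ⟨Int.emod_nonneg j (by omega), Int.emod_lt_of_pos j hP0⟩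
      have hj1bounds : 0 ≤ j1 ∧ j1 < (l.length : Int) := by
        refine ⟨Int.ediv_nonneg hj0 (by omega), ?_⟩
        rw [hj1def]
        rw [hPl] at hj1
        exact (Int.ediv_lt_iff_lt_mul hP0).mpr (by linarith)
      have hjsplit : j = j1 * (pvP ls : Int) + j2 := by
        have h := Int.mul_ediv_add_emod j (pvP ls : Int)
        rw [hj1def, hj2def]
        linarith [mul_comm (j / (pvP ls : Int)) (pvP ls : Int)]
      rw [pvH_cons, pvH_cons]
      have harg : i * (pvP (l :: ls) : Int) + j = (i * (l.length : Int) + j1) * (pvP ls : Int) + j2 := by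
        rw [hPl, hjsplit]; ring
      rw [harg, ih (i * (l.length : Int) + j1) j2 (by positivity) hj2bounds.1 hj2bounds.2]
      rw [hjsplit, ih j1 j2 hj1bounds.1 hj2bounds.1 hj2bounds.2]
      simp only [pvStep]
      rw [PySem.Int.floordiv_eq_ediv_of_pos hl0, PySem.Int.mod_eq_emod_of_pos hl0,
          PySem.Int.mod_eq_emod_of_pos hl0]
      have h3 : j1 / (l.length : Int) = 0 := Int.ediv_eq_zero_of_lt hj1bounds.1 hj1bounds.2
      have h4 : j1 % (l.length : Int) = j1 := Int.emod_eq_of_lt hj1bounds.1 hj1bounds.2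
      have h1 : (i * (l.length : Int) + j1) / (l.length : Int) = i := by
        rw [show i * (l.length : Int) + j1 = j1 + i * (l.length : Int) from by ring,
          Int.add_mul_ediv_right _ _ (show (l.length : Int) ≠ 0 by omega), h3, zero_add]
      have h2 : (i * (l.length : Int) + j1) % (l.length : Int) = j1 := by
        rw [show i * (l.length : Int) + j1 = j1 + (l.length : Int) * i from by ring,
          Int.add_mul_emod_self_left, h4]
      rw [h1, h2, h4]

-- List.range over a product splits into a flatMap
theorem pvRange_mul (n m : Nat) :
    List.range (n * m) = (List.range n).flatMap (fun i => (List.range m).map (fun j => i * m + j)) := by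
  induction n with
  | zero => simp
  | succ n ih =>
      have : (n + 1) * m = n * m + m := by ring
      rw [this, List.range_add, List.range_succ, List.flatMap_append, ← ih]
      simp

-- flatMap over a list = flatMap over its index range (via getD)
theorem pvFlatMap_range {A B : Type} (d : A) (l : List A) (h : A → List B) :
    (List.range l.length).flatMap (fun i => h (l.getD i d)) = l.flatMap h := by
  induction l with
  | nil => simp
  | cons a l ih =>
      simp only [List.length_cons, List.range_succ_eq_map, List.flatMap_cons, List.flatMap_map,
        List.getD_cons_zero, List.getD_cons_succ]
      rw [ih]

-- the decoder enumerates exactly itertools.product's output, in order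
theorem pvDecode_product : ∀ ls : List (List (Int × Int)),
    (List.range (pvP ls)).map (fun (k : Nat) => (pvH ls ((k : Nat) : Int)).2.reverse) = pyProduct ls := by
  intro ls
  induction ls with
  | nil => simp [pvP, pyProduct, pvH]
  | cons l ls ih =>
      have hP : pvP (l :: ls) = l.length * pvP ls := by simp [pvP]
      rw [hP, pvRange_mul, List.map_flatMap]
      rw [pyProduct, ← pvFlatMap_range ((0,0) : Int × Int) l (fun x => (pyProduct ls).map (x :: ·))]
      apply List.flatMap_congr
      intro i hi
      rw [List.map_map, ← ih, List.map_map]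
      apply List.map_congr_left
      intro j hj
      simp only [Function.comp_apply]
      have hjP : ((j : Nat) : Int) < ((pvP ls : Nat) : Int) := by
        exact_mod_cast List.mem_range.mp hj
      have hiL : i < l.length := List.mem_range.mp hi
      have harg : ((i * pvP ls + j : Nat) : Int) = (i : Int) * ((pvP ls : Nat) : Int) + (j : Int) := by
        push_cast; ring
      rw [harg, pvH_cons,
        pvH_decompose ls (i : Int) (j : Int) (by positivity) (by positivity) hjP]
      simp only [pvStep]
      have hl0 : (0 : Int) < (l.length : Int) := by exact_mod_cast Nat.zero_lt_of_lt hiL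
      rw [PySem.Int.mod_eq_emod_of_pos hl0,
        Int.emod_eq_of_lt (by positivity) (by exact_mod_cast hiL)]
      simp [PySem.List.pyGetD_natCast]

-- ===== VERDICT (by name: the statement is the Claim_ definition above) =====
theorem get_all_nearby_pos_spec : Claim_equal_get_all_nearby_pos := by
  intro agent_pos map_in_heart _ _
  unfold Spec_get_all_nearby_pos
  have hA : get_all_nearby_pos agent_pos map_in_heart
      = ((pyProduct (agent_pos.map (pvNbr map_in_heart))).map
          (fun ps => pvExtend PySem.Dict.empty (agent_pos.map (·.1)) ps)).map (·.items) := by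
    unfold get_all_nearby_pos
    simp only [pvNbr_eq_foldl, pvStateFold, List.nil_append,
      PySem.List.foldl_append_singleton_eq_map]
    rw [List.map_congr_left (fun ps hps => by
      rw [pvBuild_eq_extend _ _ _ (by
        rw [pvProduct_length _ ps hps, List.length_map, List.length_map])]), List.map_map]
    rfl
  have hB : get_all_nearby_pos_alt agent_pos map_in_heart
      = ((pyProduct (agent_pos.map (pvNbr map_in_heart))).map
          (fun ps => pvExtend PySem.Dict.empty (agent_pos.map (·.1)) ps)).map (·.items) := by
    unfold get_all_nearby_pos_alt
    rw [show (fun (acc : List String × List (List (Int × Int))) (ap : String × Int × Int) =>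
        (acc.1 ++ [ap.1],
         acc.2 ++ [([(ap.2.1, ap.2.2 + 1), (ap.2.1, ap.2.2 - 1), (ap.2.1 + 1, ap.2.2), (ap.2.1 - 1, ap.2.2)] :
              List (Int × Int)).filter
            (fun p => decide (0 ≤ p.1 ∧ p.1 < 24 ∧ 0 ≤ p.2 ∧ p.2 < 24 ∧
                0 ≤ PySem.List.pyGetD (PySem.List.pyGetD map_in_heart p.1 []) p.2 0))]))
      = (fun (acc : List String × List (List (Int × Int))) ap =>
        (acc.1 ++ [ap.1], acc.2 ++ [pvNbr map_in_heart ap])) from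
        funext fun acc => funext fun ap => by rw [pvNbr_eq_filter]]
    rw [pvStateFold]
    simp only [List.nil_append]
    rw [pvTotal_eq (agent_pos.map (pvNbr map_in_heart)) 1, one_mul,
      PySem.List.pyRange_zero_natCast,
      PySem.List.foldl_append_singleton_eq_map, List.map_map]
    rw [← pvDecode_product (agent_pos.map (pvNbr map_in_heart)), List.map_map]
    simp only [List.nil_append, List.map_map]
    rfl
  rw [hA, hB]
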